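-- pv_equiv track=rewrite | github.com/GTL98/sitio_3d | funcoes_principais.py | juntar_atomos_aminoacidos_sitio
-- ===== SOURCE A (Python) =====
-- def juntar_atomos_aminoacidos_sitio(lista_aa):
--     """
--     Função destinada a colocar todas as posições XYZ do mesmo aminoácido em uma única chave.
--
--     :param lista_aa:
--     :return dicionário com as chaves sendo os aminoácidos do sítio de ligação e os valores as posições
--     XYZ de cada átomo deste aminoácido:
--     """
--
--     # Colocar cada aminoácido presente no sítio de liação somente UMA vez na lista
--     lista = []
--     for x in lista_aa:
--         for y in x.keys():
--             if not y in lista: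
--                 lista.append(y)
--
--     # Criar um dicionário a partir dos aminoácidos presentes em "lista"
--     dic = dict.fromkeys(lista)
--     for chave, valor in dic.items():
--         if valor is None:
--             dic[chave] = []
--
--     # Adicionar à cada chave as posições XYZ dos átomos dos aminoácidos do sítio de ligação
--     for k in lista:
--         for z in lista_aa:
--             for c, v in z.items():
--                 if c == k:
--                     dic[c].append(v)
--
--     return dic
-- ===== SOURCE B (Python) =====
-- def juntar_atomos_aminoacidos_sitio(lista_aa):
--     # Single pass over all dicts: group each atom's XYZ value under its amino-acid key
--     # as soon as it is seen; setdefault preserves first-appearance key order.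
--     dic = {}
--     for x in lista_aa:
--         for chave, valor in x.items():
--             dic.setdefault(chave, []).append(valor)
--     return dic
-- ===== Notes on version B (the rewrite author's own statement) =====
-- stated objective: faster
-- what changed: Replaces the three separate phases (dedup key scan, dict.fromkeys + None fix-up, then per-key rescan of every dict) by one pass that groups values with dic.setdefault(key, []).append(value).
import Mathlib
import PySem

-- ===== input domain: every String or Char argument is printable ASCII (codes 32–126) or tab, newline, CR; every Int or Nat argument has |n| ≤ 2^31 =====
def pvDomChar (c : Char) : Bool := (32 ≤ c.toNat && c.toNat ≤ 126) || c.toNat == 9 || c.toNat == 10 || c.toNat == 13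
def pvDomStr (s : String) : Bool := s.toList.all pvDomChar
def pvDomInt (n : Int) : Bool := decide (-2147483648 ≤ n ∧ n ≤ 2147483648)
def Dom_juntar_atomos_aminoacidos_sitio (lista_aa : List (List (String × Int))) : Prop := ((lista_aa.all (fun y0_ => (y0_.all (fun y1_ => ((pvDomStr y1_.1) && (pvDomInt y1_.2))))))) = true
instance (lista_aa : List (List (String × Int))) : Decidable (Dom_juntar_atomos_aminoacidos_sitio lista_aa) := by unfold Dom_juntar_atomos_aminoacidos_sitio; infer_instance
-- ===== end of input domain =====

-- B: one grouping pass with setdefault/append instead of A's dedup scan + fromkeys + per-key rescan of every dict.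

-- ===== PORT A =====
-- Each Python dict argument arrives as an association list; PySem.Dict.ofList rebuilds the dict
-- exactly as Python's dict construction does (later duplicate keys overwrite in place).
def juntar_atomos_aminoacidos_sitio (lista_aa : List (List (String × Int))) : List (String × List Int) :=
  let ds := lista_aa.map (fun x => PySem.Dict.ofList x)
  -- 'if not y in lista: lista.append(y)': every key only once, in first-appearance order
  let lista : List String :=
    ds.foldl (fun l x => x.keys.foldl (fun l y => if l.contains y then l else l ++ [y]) l) []
  -- dict.fromkeys(lista) followed by the 'if valor is None: dic[chave] = []' loop:
  -- every key of lista ends bound to [] (ported directly, since fromkeys binds every key to None)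
  let dic : PySem.Dict String (List Int) :=
    lista.foldl (fun d k => d.insert k ([] : List Int)) PySem.Dict.empty
  -- 'dic[c].append(v)': c == k ∈ lista is always a key of dic, so the lookup never raises;
  -- the in-place append is ported as re-inserting the extended list
  let dic2 : PySem.Dict String (List Int) :=
    lista.foldl (fun d k =>
      ds.foldl (fun d z =>
        z.items.foldl (fun d p =>
          if p.1 == k then d.insert p.1 (d.getD p.1 [] ++ [p.2]) else d) d) d) dic
  dic2.items

-- ===== PORT B =====
def juntar_atomos_aminoacidos_sitio_alt (lista_aa : List (List (String × Int))) : List (String × List Int) :=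
  -- dic.setdefault(chave, []).append(valor)  =  modify chave [] (· ++ [valor])
  let dic : PySem.Dict String (List Int) :=
    lista_aa.foldl (fun d x =>
      (PySem.Dict.ofList x).items.foldl (fun d p => d.modify p.1 [] (fun l => l ++ [p.2])) d)
      PySem.Dict.empty
  dic.items

-- ===== PRECONDITION & SPEC =====
def Spec_juntar_atomos_aminoacidos_sitio (lista_aa : List (List (String × Int))) (out : List (String × List Int)) : Prop := out = juntar_atomos_aminoacidos_sitio_alt lista_aa
instance (lista_aa : List (List (String × Int))) (out : List (String × List Int)) : Decidable (Spec_juntar_atomos_aminoacidos_sitio lista_aa out) := by unfold Spec_juntar_atomos_aminoacidos_sitio; infer_instance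

-- ===== CLAIM (what is proved, stated in full; the proofs are below) =====
def Claim_equal_juntar_atomos_aminoacidos_sitio : Prop := ∀ (lista_aa : List (List (String × Int))), Dom_juntar_atomos_aminoacidos_sitio lista_aa → Spec_juntar_atomos_aminoacidos_sitio lista_aa (juntar_atomos_aminoacidos_sitio lista_aa)

-- ===== LEMMAS AND PROOFS =====

-- the flattened item stream of all the dicts, in traversal order
def pvFlat (lista_aa : List (List (String × Int))) : List (String × Int) :=
  lista_aa.flatMap (fun x => (PySem.Dict.ofList x).items)

-- the grouped values of key c
def pvVals (lista_aa : List (List (String × Int))) (c : String) : List Int :=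
  ((pvFlat lista_aa).filter (fun p => p.1 == c)).map (fun p => p.2)

theorem pvB_eq (lista_aa : List (List (String × Int))) :
    juntar_atomos_aminoacidos_sitio_alt lista_aa =
      ((pvFlat lista_aa).foldl (fun d p => d.modify p.1 [] (fun l => l ++ [p.2]))
        PySem.Dict.empty).items := by
  simp [juntar_atomos_aminoacidos_sitio_alt, pvFlat, List.foldl_flatMap]

-- A's first phase builds exactly Set.ofList of the flattened key stream
theorem pvLista_eq (la : List (List (String × Int))) :
    ((la.map (fun x => PySem.Dict.ofList x)).foldl
        (fun l x => x.keys.foldl (fun l y => if l.contains y then l else l ++ [y]) l) []) =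
      PySem.Set.ofList ((pvFlat la).map (fun p => p.1)) := by
  have hstep : (fun (l : List String) (x : PySem.Dict String Int) =>
      x.keys.foldl (fun l y => if l.contains y then l else l ++ [y]) l)
      = (fun l x => PySem.Set.update l x.keys) := rfl
  rw [hstep]
  have h1 : ∀ (L : List (PySem.Dict String Int)) (s : PySem.Set String),
      L.foldl (fun l x => PySem.Set.update l x.keys) s
        = PySem.Set.update s (L.flatMap PySem.Dict.keys) := by
    intro L
    induction L with
    | nil => intro s; simp [PySem.Set.update]
    | cons x L ih =>
      intro s
      simp only [List.foldl_cons, List.flatMap_cons, PySem.Set.update_append, ih]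
  rw [h1]
  have h2 : ((la.map (fun x => PySem.Dict.ofList x)).flatMap PySem.Dict.keys)
      = (pvFlat la).map (fun p => p.1) := by
    simp [pvFlat, PySem.Dict.keys, List.map_flatMap, List.flatMap_map]
  rw [h2]
  rfl

-- inner loop of A's third phase: only key k changes, by appending the matching values
theorem pvInnerA (l : List (String × Int)) (k : String) :
    ∀ d : PySem.Dict String (List Int), d.contains k = true →
    ((l.foldl (fun d p => if p.1 == k then d.insert p.1 (d.getD p.1 [] ++ [p.2]) else d) d).keys
        = d.keys) ∧
    (∀ c, (l.foldl (fun d p => if p.1 == k then d.insert p.1 (d.getD p.1 [] ++ [p.2]) else d) d).getD c []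
        = if c = k then d.getD k [] ++ ((l.filter (fun p => p.1 == k)).map (fun p => p.2)) else d.getD c []) := by
  induction l with
  | nil =>
    intro d _
    refine ⟨rfl, fun c => ?_⟩
    by_cases hc : c = k
    · subst hc; simp
    · simp [hc]
  | cons p l ih =>
    intro d hk
    by_cases hp : p.1 = k
    · have hbeq : (p.1 == k) = true := by simp [hp]
      have hc1 : (d.insert p.1 (d.getD p.1 [] ++ [p.2])).contains k = true := by
        rw [hp]; exact PySem.Dict.contains_insert_self ..
      obtain ⟨hkeys, hget⟩ := ih _ hc1
      simp only [List.foldl_cons, hbeq, if_true]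
      constructor
      · rw [hkeys]
        exact PySem.Dict.keys_insert_of_contains d _ (hp ▸ hk)
      · intro c
        rw [hget c]
        by_cases hc : c = k
        · subst hc
          rw [if_pos rfl, if_pos rfl, PySem.Dict.getD_insert]
          rw [if_pos hp.symm, hp]
          simp [hbeq, List.append_assoc]
        · rw [if_neg hc, if_neg hc, PySem.Dict.getD_insert, if_neg (hp ▸ hc)]
    · have hbeq : (p.1 == k) = false := by simp [hp]
      obtain ⟨hkeys, hget⟩ := ih d hk
      simp only [List.foldl_cons, hbeq, Bool.false_eq_true, if_false]
      refine ⟨hkeys, fun c => ?_⟩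
      rw [hget c]
      by_cases hc : c = k
      · subst hc; simp [hbeq]
      · simp [hc]

-- outer loop of A's third phase: each key of rem receives its grouped values once
theorem pvOuterA (flat : List (String × Int)) (rem : List String) :
    rem.Nodup → ∀ d : PySem.Dict String (List Int), (∀ k ∈ rem, d.contains k = true) →
    ((rem.foldl (fun d k =>
        flat.foldl (fun d p => if p.1 == k then d.insert p.1 (d.getD p.1 [] ++ [p.2]) else d) d) d).keys
        = d.keys) ∧
    (∀ c, (rem.foldl (fun d k =>
        flat.foldl (fun d p => if p.1 == k then d.insert p.1 (d.getD p.1 [] ++ [p.2]) else d) d) d).getD c []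
        = if c ∈ rem then d.getD c [] ++ ((flat.filter (fun p => p.1 == c)).map (fun p => p.2)) else d.getD c []) := by
  induction rem with
  | nil =>
    intro _ d _
    exact ⟨rfl, fun c => by simp⟩
  | cons k rem ih =>
    intro hnd d hcont
    have hk : d.contains k = true := hcont k (by simp)
    obtain ⟨h1k, h1g⟩ := pvInnerA flat k d hk
    have hknotin : k ∉ rem := (List.nodup_cons.mp hnd).1
    have hcont' : ∀ j ∈ rem,
        (flat.foldl (fun d p => if p.1 == k then d.insert p.1 (d.getD p.1 [] ++ [p.2]) else d) d).contains j = true := by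
      intro j hj
      have := hcont j (by simp [hj])
      rw [PySem.Dict.contains_eq_decide_mem_keys] at this ⊢
      rwa [h1k]
    obtain ⟨h2k, h2g⟩ := ih (List.nodup_cons.mp hnd).2 _ hcont'
    refine ⟨?_, ?_⟩
    · simp only [List.foldl_cons]
      rw [h2k, h1k]
    · intro c
      simp only [List.foldl_cons]
      rw [h2g c]
      by_cases hc1 : c = k
      · subst hc1
        rw [if_neg hknotin, h1g c, if_pos rfl, if_pos (by simp)]
      · by_cases hc2 : c ∈ rem
        · rw [if_pos hc2, h1g c, if_neg hc1, if_pos (by simp [hc2])]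
        · rw [if_neg hc2, h1g c, if_neg hc1, if_neg (by simp [hc1, hc2])]

-- characterisation of A's result
theorem pvA_char (la : List (List (String × Int))) :
    juntar_atomos_aminoacidos_sitio la =
      (PySem.Set.ofList ((pvFlat la).map (fun p => p.1))).map (fun k => (k, pvVals la k)) := by
  simp only [juntar_atomos_aminoacidos_sitio]
  rw [pvLista_eq la]
  set S := PySem.Set.ofList ((pvFlat la).map (fun p => p.1)) with hS
  have hflatfold : ∀ (d : PySem.Dict String (List Int)) (k : String),
      ((la.map (fun x => PySem.Dict.ofList x)).foldl (fun d z =>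
        z.items.foldl (fun d p =>
          if p.1 == k then d.insert p.1 (d.getD p.1 [] ++ [p.2]) else d) d) d)
      = (pvFlat la).foldl (fun d p =>
          if p.1 == k then d.insert p.1 (d.getD p.1 [] ++ [p.2]) else d) d := by
    intro d k
    rw [← List.foldl_flatMap]
    congr 1
    simp [pvFlat, List.flatMap_map]
  simp only [hflatfold]
  have hnd : S.Nodup := PySem.Set.nodup_ofList _
  have hitems0 : (S.foldl (fun d k => d.insert k ([] : List Int)) PySem.Dict.empty).items
      = S.map (fun k => (k, ([] : List Int))) := by
    have := PySem.Dict.items_foldl_insert_fresh S (fun a => a) (fun _ => ([] : List Int))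
      PySem.Dict.empty (by intro a _; simp) (by simpa using hnd)
    simpa using this
  have hkeys0 : (S.foldl (fun d k => d.insert k ([] : List Int)) PySem.Dict.empty).keys = S := by
    simp [PySem.Dict.keys, hitems0, Function.comp_def]
  have hcont0 : ∀ k ∈ S, (S.foldl (fun d k => d.insert k ([] : List Int)) PySem.Dict.empty).contains k = true := by
    intro k hk
    rw [PySem.Dict.contains_eq_decide_mem_keys, hkeys0]
    simpa using hk
  have hget0 : ∀ c, (S.foldl (fun d k => d.insert k ([] : List Int)) PySem.Dict.empty).getD c [] = ([] : List Int) := by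
    intro c
    by_cases hc : c ∈ S
    · have hmem : (c, ([] : List Int)) ∈ (S.foldl (fun d k => d.insert k ([] : List Int)) PySem.Dict.empty).items := by
        rw [hitems0]; exact List.mem_map.mpr ⟨c, hc, rfl⟩
      exact PySem.Dict.getD_of_mem_items _ hmem (by rw [hkeys0]; exact hnd) []
    · apply PySem.Dict.getD_of_not_contains
      rw [PySem.Dict.contains_eq_decide_mem_keys, hkeys0]
      simpa using hc
  obtain ⟨hk2, hg2⟩ := pvOuterA (pvFlat la) S hnd _ hcont0
  have hnd2 : ((S.foldl (fun d k =>
      (pvFlat la).foldl (fun d p =>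
        if p.1 == k then d.insert p.1 (d.getD p.1 [] ++ [p.2]) else d) d)
      (S.foldl (fun d k => d.insert k ([] : List Int)) PySem.Dict.empty)).keys).Nodup := by
    rw [hk2, hkeys0]; exact hnd
  rw [PySem.Dict.items_eq_map_keys _ hnd2 ([] : List Int), hk2, hkeys0]
  apply List.map_congr_left
  intro k hk
  have h := hg2 k
  rw [if_pos hk, hget0 k] at h
  simp only [Prod.mk.injEq, true_and]
  rw [h]; simp [pvVals]

-- characterisation of B's result
theorem pvB_char (la : List (List (String × Int))) :
    juntar_atomos_aminoacidos_sitio_alt la =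
      (PySem.Set.ofList ((pvFlat la).map (fun p => p.1))).map (fun k => (k, pvVals la k)) := by
  rw [pvB_eq]
  have hkeys := PySem.Dict.keys_foldl_modify_key (pvFlat la) (fun p : String × Int => p.1)
    ([] : List Int) (fun _ p => fun l => l ++ [p.2]) PySem.Dict.empty
  have hkeys' : ((pvFlat la).foldl (fun d p => d.modify p.1 [] (fun l => l ++ [p.2]))
      PySem.Dict.empty).keys = PySem.Set.ofList ((pvFlat la).map (fun p => p.1)) := by
    simpa [PySem.Set.update] using hkeys
  have hnodup : (((pvFlat la).foldl (fun d p => d.modify p.1 [] (fun l => l ++ [p.2]))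
      PySem.Dict.empty).keys).Nodup := by
    rw [hkeys']; exact PySem.Set.nodup_ofList _
  rw [PySem.Dict.items_eq_map_keys _ hnodup ([] : List Int), hkeys']
  apply List.map_congr_left
  intro k _
  rw [PySem.Dict.getD_foldl_modify_append]
  simp [pvVals]

-- ===== VERDICT (by name: the statement is the Claim_ definition above) =====
theorem juntar_atomos_aminoacidos_sitio_spec : Claim_equal_juntar_atomos_aminoacidos_sitio := by
  intro la _
  unfold Spec_juntar_atomos_aminoacidos_sitio
  rw [pvA_char, pvB_char]
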